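-- pv_equiv track=rewrite | github.com/tjur/python-intern | task-1/hack_power.py | letter_power
-- ===== SOURCE A (Python) =====
-- def letter_power(letters, hack):
--     # create dict: letter -> number of already found repetitions
--     letters_count = dict.fromkeys(letters.keys(), 0)
--     power = 0
--     for c in hack:
--         if c not in letters:
--             raise ValueError
--
--         letters_count[c] += 1
--         power += letters_count[c] * letters[c]
--     return power
-- ===== SOURCE B (Python) =====
-- def letter_power(letters, hack):
--     # Count each character once, then use the triangular closed form
--     # weight * cnt*(cnt+1)//2 for the cumulative contribution of a character.
--     counts = {}
--     for c in hack:
--         counts[c] = counts.get(c, 0) + 1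
--     for c in counts:
--         if c not in letters:
--             raise ValueError
--     return sum(letters[c] * (n * (n + 1) // 2) for c, n in counts.items())
-- ===== Notes on version B (the rewrite author's own statement) =====
-- stated objective: simpler
-- what changed: Instead of A's per-occurrence loop with a running repetition dict and accumulated power, B counts each character once and sums letters[c] * (cnt*(cnt+1)//2) per distinct character using the triangular closed form.
import Mathlib
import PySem

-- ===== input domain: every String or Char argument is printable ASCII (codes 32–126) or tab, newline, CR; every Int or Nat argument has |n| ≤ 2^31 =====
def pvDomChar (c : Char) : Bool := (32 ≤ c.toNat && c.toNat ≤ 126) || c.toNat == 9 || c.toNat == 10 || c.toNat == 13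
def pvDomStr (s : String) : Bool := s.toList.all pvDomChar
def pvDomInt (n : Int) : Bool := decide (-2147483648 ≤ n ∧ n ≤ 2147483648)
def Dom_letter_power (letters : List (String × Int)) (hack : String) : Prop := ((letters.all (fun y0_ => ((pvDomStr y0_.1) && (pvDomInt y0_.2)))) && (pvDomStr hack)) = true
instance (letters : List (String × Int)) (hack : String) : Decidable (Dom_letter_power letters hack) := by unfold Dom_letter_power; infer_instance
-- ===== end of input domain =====

-- B replaces A's per-occurrence running accumulation by a single character count followed by the
-- triangular closed form weight * (cnt*(cnt+1)//2) per distinct character (simpler grouped pass).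


-- ===== PORT A =====
-- A iterates hack keeping a per-letter running count, adding count*weight at each occurrence.
-- The 'raise ValueError' branch (c not in letters) is excluded by Pre_letter_power; under Pre_
-- every key is present, so 'letters_count[c] += 1' is the modify with default 0 and both lookups are getD.
def letter_power (letters : List (String × Int)) (hack : String) : Int :=
  let L : PySem.Dict String Int := PySem.Dict.mk letters
  -- letters_count = dict.fromkeys(letters.keys(), 0)
  let lc0 : PySem.Dict String Int := PySem.Dict.mk (L.keys.map (fun k => (k, (0 : Int))))
  (hack.toList.foldl
    (fun (st : PySem.Dict String Int × Int) c =>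
      let s := String.mk [c]
      let lc := st.1.modify s 0 (· + 1)                    -- letters_count[c] += 1
      (lc, st.2 + lc.getD s 0 * L.getD s 0))               -- power += letters_count[c] * letters[c]
    (lc0, 0)).2

-- ===== PORT B =====
-- B (Source B): counts = {c: multiplicity} built in one loop, then sum of letters[c] * (n*(n+1)//2).
-- Source B's 'raise ValueError' check (some counted char not a key of letters) is excluded by Pre_letter_power.
def letter_power_alt (letters : List (String × Int)) (hack : String) : Int :=
  let L : PySem.Dict String Int := PySem.Dict.mk letters
  let counts : PySem.Dict String Int :=
    hack.toList.foldl (fun d c => let s := String.mk [c]; d.insert s (d.getD s 0 + 1)) PySem.Dict.empty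
  counts.items.foldl
    (fun acc p => acc + L.getD p.1 0 * PySem.Int.floordiv (p.2 * (p.2 + 1)) 2) 0

-- ===== PRECONDITION & SPEC =====
-- Pre_ excludes exactly the inputs where the Python A raises ValueError:
-- some character of hack is not a key of letters (Source B raises there too).
def Pre_letter_power (letters : List (String × Int)) (hack : String) : Prop :=
  (hack.toList.all (fun c => (PySem.Dict.mk letters).contains (String.mk [c]))) = true
instance (letters : List (String × Int)) (hack : String) : Decidable (Pre_letter_power letters hack) := by
  unfold Pre_letter_power; infer_instance

def pvWitness_letter_power : (List (String × Int)) × String := ([("a", 2), ("b", -3)], "abaa")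

def Spec_letter_power (letters : List (String × Int)) (hack : String) (out : Int) : Prop := out = letter_power_alt letters hack
instance (letters : List (String × Int)) (hack : String) (out : Int) : Decidable (Spec_letter_power letters hack out) := by unfold Spec_letter_power; infer_instance

-- ===== CLAIM (what is proved, stated in full; the proofs are below) =====
def Claim_equal_letter_power : Prop := ∀ (letters : List (String × Int)) (hack : String), Dom_letter_power letters hack → Pre_letter_power letters hack → Spec_letter_power letters hack (letter_power letters hack)

-- ===== LEMMAS AND PROOFS =====

-- A's loop step, over the (already key-mapped) string list.
def aStep (L : PySem.Dict String Int) (st : PySem.Dict String Int × Int) (s : String) : PySem.Dict String Int × Int :=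
  let lc := st.1.modify s 0 (· + 1)
  (lc, st.2 + lc.getD s 0 * L.getD s 0)

-- B's summand.
def bTerm (L : PySem.Dict String Int) (p : String × Int) : Int :=
  L.getD p.1 0 * PySem.Int.floordiv (p.2 * (p.2 + 1)) 2

-- dict.fromkeys(·, 0) reads 0 at every key (present or not).
theorem lc0_getD (ks : List String) (s : String) :
    (PySem.Dict.mk (ks.map (fun k => (k, (0 : Int))))).getD s 0 = 0 := by
  induction ks with
  | nil => simp [PySem.Dict.getD, PySem.Dict.get?]
  | cons a t ih =>
    by_cases h : a == s <;> simp_all [PySem.Dict.getD, PySem.Dict.get?]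

-- The counts dict carried by A's loop is the plain modify-fold (the power does not feed back into it).
theorem aFold_fst (L : PySem.Dict String Int) (xs : List String) (d : PySem.Dict String Int) (p : Int) :
    (xs.foldl (aStep L) (d, p)).1 = xs.foldl (fun d s => d.modify s 0 (· + 1)) d := by
  induction xs generalizing d p with
  | nil => rfl
  | cons a t ih => simpa [aStep] using ih ..

-- Triangular-number step: (n+1)(n+2)//2 = n(n+1)//2 + (n+1).
theorem tri_succ (n : ℕ) :
    PySem.Int.floordiv ((↑n + 1) * (↑n + 1 + 1)) 2 = PySem.Int.floordiv ((↑n : ℤ) * (↑n + 1)) 2 + (↑n + 1) := by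
  have h1 : ((n : ℤ) + 1) * (↑n + 1 + 1) = (((n+1)*(n+2) : ℕ) : ℤ) := by push_cast; ring
  have h2 : (n : ℤ) * (↑n + 1) = ((n*(n+1) : ℕ) : ℤ) := by push_cast; ring
  rw [h1, h2, show (2:ℤ) = ((2:ℕ):ℤ) from rfl, PySem.Int.floordiv_natCast, PySem.Int.floordiv_natCast]
  obtain ⟨k, hk⟩ := Nat.even_mul_succ_self n
  have h3 : (n+1)*(n+2) = k + k + 2*(n+1) := by rw [← hk]; ring
  have hnat : (n+1)*(n+2)/2 = n*(n+1)/2 + (n+1) := by omega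
  rw [hnat]; push_cast; ring

-- Updating one summand of a sum over a duplicate-free index list.
theorem sum_update (f g : String → Int) (S : List String) (hnd : S.Nodup) (s : String) (hs : s ∈ S)
    (hoff : ∀ k ∈ S, k ≠ s → g k = f k) :
    (S.map g).sum = (S.map f).sum + (g s - f s) := by
  induction S with
  | nil => cases hs
  | cons a t ih =>
    rcases List.mem_cons.mp hs with h | h
    · subst h
      have : ∀ k ∈ t, g k = f k := fun k hk =>
        hoff k (List.mem_cons_of_mem _ hk) (fun he => (List.nodup_cons.mp hnd).1 (he ▸ hk))
      simp [List.map_congr_left this]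
      ring
    · have ha : g a = f a := hoff a (List.mem_cons_self) (fun he => (List.nodup_cons.mp hnd).1 (he ▸ h))
      have := ih (List.nodup_cons.mp hnd).2 h (fun k hk => hoff k (List.mem_cons_of_mem _ hk))
      simp [ha, this]
      ring

-- Main invariant: A's running power equals B's triangular sum over Counter items, for any
-- start dict that reads 0 everywhere (snoc induction; both sides grow by (count+1)*weight).
theorem main_lemma (L lc0 : PySem.Dict String Int) (h0 : ∀ s, lc0.getD s 0 = 0) (xs : List String) :
    (xs.foldl (aStep L) (lc0, 0)).2 = ((PySem.Dict.counter xs).items.map (bTerm L)).sum := by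
  induction xs using List.reverseRecOn with
  | nil => simp [PySem.Dict.counter, PySem.Dict.empty]
  | append_singleton xs s ih =>
    rw [List.foldl_append]
    have hcnt : (xs.foldl (aStep L) (lc0, 0)).1.getD s 0 = (xs.count s : Int) := by
      rw [aFold_fst, PySem.Dict.getD_foldl_modify_add_one, h0 s, zero_add]
    show (aStep L (xs.foldl (aStep L) (lc0, 0)) s).2 = _
    rw [show (aStep L (xs.foldl (aStep L) (lc0, 0)) s).2
        = (xs.foldl (aStep L) (lc0, 0)).2
          + ((xs.foldl (aStep L) (lc0, 0)).1.getD s 0 + 1) * L.getD s 0 by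
      simp [aStep, PySem.Dict.getD_modify_self]]
    rw [hcnt, ih]
    rw [PySem.Dict.items_counter, PySem.Dict.items_counter, List.map_map, List.map_map]
    simp only [Function.comp_def]
    have hone : ∀ k : String, k ≠ s → List.count k [s] = 0 := by
      intro k hk; simp [List.count_eq_zero, hk]
    rw [PySem.Set.ofList_append]
    rw [show PySem.Set.update (PySem.Set.ofList xs) [s] = PySem.Set.add (PySem.Set.ofList xs) s from rfl]
    by_cases hmem : s ∈ PySem.Set.ofList xs
    · have hadd : PySem.Set.add (PySem.Set.ofList xs) s = PySem.Set.ofList xs := by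
        simp [PySem.Set.add, PySem.Set.contains, hmem]
      rw [hadd]
      rw [sum_update
        (f := fun k => bTerm L (k, (xs.count k : Int)))
        (g := fun k => bTerm L (k, ((xs ++ [s]).count k : Int)))
        _ (PySem.Set.nodup_ofList xs) s hmem
        (by intro k hk hne; simp [List.count_append, hone k hne])]
      have : ((xs ++ [s]).count s : Int) = (xs.count s : Int) + 1 := by
        simp [List.count_append]
      rw [this]
      simp only [bTerm]
      have := tri_succ (xs.count s)
      push_cast at this ⊢
      rw [this]
      ring
    · have hadd : PySem.Set.add (PySem.Set.ofList xs) s = PySem.Set.ofList xs ++ [s] := by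
        simp [PySem.Set.add, PySem.Set.contains, hmem]
      rw [hadd, List.map_append, List.sum_append]
      have hs_xs : s ∉ xs := by rwa [PySem.Set.mem_ofList] at hmem
      have hcongr : ∀ k ∈ PySem.Set.ofList xs,
          bTerm L (k, ((xs ++ [s]).count k : Int)) = bTerm L (k, (xs.count k : Int)) := by
        intro k hk
        have hne : k ≠ s := fun he => hs_xs (he ▸ ((PySem.Set.mem_ofList _ _).mp hk))
        simp [List.count_append, hone k hne]
      rw [List.map_congr_left hcongr]
      have hc0 : xs.count s = 0 := List.count_eq_zero.mpr hs_xs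
      simp [hc0, bTerm, List.count_append]

-- ===== VERDICT (by name: the statement is the Claim_ definition above) =====
theorem letter_power_spec : Claim_equal_letter_power := by
  intro letters hack _ _
  unfold Spec_letter_power letter_power letter_power_alt
  have hA : (hack.toList.foldl
      (fun (st : PySem.Dict String Int × Int) c =>
        let s := String.mk [c]
        let lc := st.1.modify s 0 (· + 1)
        (lc, st.2 + lc.getD s 0 * (PySem.Dict.mk letters).getD s 0))
      (PySem.Dict.mk (((PySem.Dict.mk letters : PySem.Dict String Int).keys).map (fun k => (k, (0 : Int)))), 0)).2
      = ((hack.toList.map (fun c => String.mk [c])).foldl (aStep (PySem.Dict.mk letters))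
          (PySem.Dict.mk (((PySem.Dict.mk letters : PySem.Dict String Int).keys).map (fun k => (k, (0 : Int)))), 0)).2 := by
    rw [List.foldl_map]; rfl
  have hB : (hack.toList.foldl
        (fun (d : PySem.Dict String Int) c => let s := String.mk [c]; d.insert s (d.getD s 0 + 1))
        PySem.Dict.empty).items.foldl
        (fun acc p => acc + (PySem.Dict.mk letters).getD p.1 0 * PySem.Int.floordiv (p.2 * (p.2 + 1)) 2) 0
      = (PySem.Dict.counter (hack.toList.map (fun c => String.mk [c]))).items.foldl
          (fun acc p => acc + bTerm (PySem.Dict.mk letters) p) 0 := by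
    rw [← PySem.Dict.foldl_insert_getD_add_one_eq_counter, List.foldl_map]; rfl
  show _ = _
  rw [hA, hB,
      PySem.List.foldl_add (g := bTerm (PySem.Dict.mk letters)) (a := 0),
      main_lemma _ _ (fun s => lc0_getD _ s)]
  simp
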